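-- pv_equiv track=rewrite | github.com/Umar-604/ZU-Detector | URL.py | improved_sanitization
-- ===== SOURCE A (Python) =====
-- def improved_sanitization(url):
--     url = str(url).lower()  # Ensure input is a string and lowercase it
--     url = url.split('://')[-1]  # Remove protocol
--     if url.startswith('www.'):
--         url = url[4:]  # Remove 'www.'
--     parts = url.split('/')
--     tokens = []
--     for part in parts:
--         sub_tokens = part.replace('.', '-').split('-')
--         tokens.extend([token for token in sub_tokens if token and token not in ['com', 'org', 'net']])
--     return tokens
-- ===== SOURCE B (Python) =====
-- def improved_sanitization(url):
--     url = str(url).lower()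
--     url = url.split('://')[-1]
--     if url.startswith('www.'):
--         url = url[4:]
--     banned = ['com', 'org', 'net']
--     tokens = []
--     cur = ''
--     for ch in url:
--         if ch in '/.-':
--             if cur and cur not in banned:
--                 tokens.append(cur)
--             cur = ''
--         else:
--             cur += ch
--     if cur and cur not in banned:
--         tokens.append(cur)
--     return tokens
-- ===== Notes on version B (the rewrite author's own statement) =====
-- stated objective: simpler
-- what changed: After the same lowercase/protocol/www prefix handling, B replaces the nested split('/') loop with replace('.','-').split('-') per part by a single left-to-right character scan that cuts tokens at the slash, dot and hyphen delimiters and filters empty and com/org/net tokens as it goes.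
import Mathlib
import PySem

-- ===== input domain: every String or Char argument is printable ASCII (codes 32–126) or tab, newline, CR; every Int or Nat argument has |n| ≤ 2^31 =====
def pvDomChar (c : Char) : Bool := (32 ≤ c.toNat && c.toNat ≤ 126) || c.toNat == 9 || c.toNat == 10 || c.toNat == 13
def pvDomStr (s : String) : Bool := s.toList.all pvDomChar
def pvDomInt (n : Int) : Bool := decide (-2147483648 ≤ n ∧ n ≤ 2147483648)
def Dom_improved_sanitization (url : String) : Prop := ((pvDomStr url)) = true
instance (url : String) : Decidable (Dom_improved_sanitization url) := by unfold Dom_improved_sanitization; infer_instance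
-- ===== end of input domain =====

-- B replaces the nested split('/') / replace('.','-') / split('-') passes by one left-to-right
-- character scan that cuts tokens at the slash, dot and hyphen delimiters (objective: simpler, one pass).

-- ===== PORT A =====
def improved_sanitization (url : String) : List String :=
  let u1 := PySem.Str.lower url
  -- url.split('://')[-1]: split? is always `some` (sep ≠ "") and never empty, so the defaults never fire
  let u2 := (PySem.List.pyGet? ((PySem.Str.split? u1 "://").getD []) (-1)).getD ""
  let u3 := if PySem.Str.startswith u2 "www." then PySem.Str.slice u2 (some 4) none else u2
  let parts := (PySem.Str.split? u3 "/").getD []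
  parts.foldl (fun tokens part =>
    let sub_tokens := (PySem.Str.split? (PySem.Str.replace part "." "-") "-").getD []
    tokens ++ sub_tokens.filter
      (fun token => (!(token == "")) && !(["com", "org", "net"].contains token))) []

-- ===== PORT B =====
-- the scan loop of Source B: cur is the token being built, tokens the output; the delimiter
-- membership test is the three-way comparison, the trailing flush is the [] case
def pvScan : List Char → String → List String → List String
  | [], cur, tokens =>
      if (!(cur == "")) && !(["com", "org", "net"].contains cur) then tokens ++ [cur] else tokens
  | c :: rest, cur, tokens =>
      if c == '/' || c == '.' || c == '-' then
        pvScan rest ""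
          (if (!(cur == "")) && !(["com", "org", "net"].contains cur) then tokens ++ [cur] else tokens)
      else
        pvScan rest (cur.push c) tokens

def improved_sanitization_alt (url : String) : List String :=
  let u1 := PySem.Str.lower url
  let u2 := (PySem.List.pyGet? ((PySem.Str.split? u1 "://").getD []) (-1)).getD ""
  let u3 := if PySem.Str.startswith u2 "www." then PySem.Str.slice u2 (some 4) none else u2
  pvScan u3.toList "" []

-- ===== PRECONDITION & SPEC =====
def Spec_improved_sanitization (url : String) (out : List String) : Prop := out = improved_sanitization_alt url
instance (url : String) (out : List String) : Decidable (Spec_improved_sanitization url out) := by unfold Spec_improved_sanitization; infer_instance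

-- ===== CLAIM (what is proved, stated in full; the proofs are below) =====
def Claim_equal_improved_sanitization : Prop := ∀ (url : String), Dom_improved_sanitization url → Spec_improved_sanitization url (improved_sanitization url)

-- ===== LEMMAS AND PROOFS =====

-- token-level predicate and helpers used only by the proofs
def pvGoodL (t : List Char) : Bool :=
  (!(String.ofList t == "")) && !(["com", "org", "net"].contains (String.ofList t))

def pvAll (c : Char) : Bool := c == '/' || c == '.' || c == '-'

def pvF (c : Char) : Char := if c == '.' then '-' else c

def pvGA (pl : List Char) : List (List Char) :=
  (List.splitOnP (· == '-') (pl.map pvF)).filter pvGoodL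
theorem pv_splitOn_go_eq (c : Char) :
    ∀ (l : List Char) (fuel : Nat) (cur : List Char) (acc : List (List Char)),
      l.length ≤ fuel →
      PySem.Chars.splitOn.go [c] fuel l cur acc
        = acc.reverse ++ (List.splitOnP (· == c) l).modifyHead (cur.reverse ++ ·) := by
  intro l
  induction l with
  | nil =>
    intro fuel cur acc h
    cases fuel <;> simp [PySem.Chars.splitOn.go, List.splitOnP_nil]
  | cons a t ih =>
    intro fuel cur acc h
    cases fuel with
    | zero => simp at h
    | succ n =>
      rw [PySem.Chars.splitOn.go]
      simp only [List.splitOnP_cons]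
      have hpref : List.isPrefixOf [c] (a :: t) = (a == c) := by
        simp [List.isPrefixOf, BEq.comm]
      rw [hpref]
      simp only [List.length_cons] at h
      by_cases hac : (a == c) = true
      · rw [hac]
        simp only [List.length_singleton, List.drop_succ_cons, List.drop_zero]
        rw [ih n [] (cur.reverse :: acc) (by omega)]
        simp
        cases (List.splitOnP (fun x => x == c) t) <;> simp
      · rw [Bool.of_not_eq_true hac]
        simp only [if_neg (by simp : ¬ (false = true))]
        rw [ih n (a :: cur) acc (by omega)]
        have : (List.splitOnP (fun x => x == c) t) ≠ [] := List.splitOnP_ne_nil _ _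
        obtain ⟨h0, rest, hrw⟩ := List.exists_cons_of_ne_nil this
        rw [hrw]
        simp

theorem pv_splitOn_singleton (c : Char) (l : List Char) :
    PySem.Chars.splitOn l [c] = List.splitOnP (· == c) l := by
  unfold PySem.Chars.splitOn
  rw [pv_splitOn_go_eq c l (l.length + 1) [] [] (by omega)]
  simp
  cases (List.splitOnP (fun x => x == c) l) <;> simp

theorem pv_replace_go_eq (a b : Char) :
    ∀ (l : List Char) (fuel : Nat) (acc : List Char),
      l.length ≤ fuel →
      PySem.Chars.replace.go [a] [b] fuel l acc
        = acc.reverse ++ l.map (fun c => if c == a then b else c) := by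
  intro l
  induction l with
  | nil =>
    intro fuel acc h
    cases fuel <;> simp [PySem.Chars.replace.go]
  | cons x t ih =>
    intro fuel acc h
    cases fuel with
    | zero => simp at h
    | succ n =>
      rw [PySem.Chars.replace.go]
      have hpref : List.isPrefixOf [a] (x :: t) = (x == a) := by
        simp [List.isPrefixOf, BEq.comm]
      rw [hpref]
      simp only [List.length_cons] at h
      by_cases hxa : (x == a) = true
      · rw [hxa]
        simp only [List.length_singleton, List.drop_succ_cons, List.drop_zero]
        rw [ih n ([b].reverse ++ acc) (by omega)]
        simp [show x = a from by simpa using hxa]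
      · rw [Bool.of_not_eq_true hxa]
        simp only [if_neg (by simp : ¬ (false = true))]
        rw [ih n (x :: acc) (by omega)]
        simp [show ¬ x = a from by simpa using hxa]

theorem pv_replace_singleton (a b : Char) (l : List Char) :
    PySem.Chars.replace l [a] [b] = l.map (fun c => if c == a then b else c) := by
  unfold PySem.Chars.replace
  rw [if_neg (by simp)]
  rw [pv_replace_go_eq a b l l.length [] (by omega)]
  simp

theorem pv_splitOnP_append (p : Char → Bool) :
    ∀ (pre l : List Char), (∀ c ∈ pre, p c = false) →
      List.splitOnP p (pre ++ l) = (List.splitOnP p l).modifyHead (pre ++ ·) := by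
  intro pre
  induction pre with
  | nil =>
    intro l h
    simp
    cases (List.splitOnP p l) <;> simp
  | cons x t ih =>
    intro l h
    simp only [List.cons_append, List.splitOnP_cons]
    rw [if_neg (by simp [h x (by simp)])]
    rw [ih l (fun c hc => h c (by simp [hc]))]
    rw [List.modifyHead_modifyHead]
    congr 1

theorem pv_scan_eq (l : List Char) :
    ∀ (cur : String) (tokens : List String),
      pvScan l cur tokens
        = tokens ++ (((List.splitOnP pvAll l).modifyHead (cur.toList ++ ·)).filter pvGoodL).map String.ofList := by
  induction l with
  | nil =>
    intro cur tokens
    have hg : pvGoodL cur.toList = ((!(cur == "")) && !(["com", "org", "net"].contains cur)) := by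
      simp [pvGoodL, String.ofList_toList]
    rw [show pvScan [] cur tokens
        = (if (!(cur == "")) && !(["com", "org", "net"].contains cur) then tokens ++ [cur] else tokens)
        from rfl]
    rw [List.splitOnP_nil]
    simp only [List.modifyHead_cons, List.append_nil, List.filter_cons, List.filter_nil, hg]
    by_cases hc : ((!(cur == "")) && !(["com", "org", "net"].contains cur)) = true
    · rw [if_pos hc, if_pos hc]; simp [String.ofList_toList]
    · rw [if_neg hc, if_neg hc]; simp
  | cons c t ih =>
    intro cur tokens
    by_cases h : (c == '/' || c == '.' || c == '-') = true
    · rw [show pvScan (c :: t) cur tokens = pvScan t ""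
          (if (!(cur == "")) && !(["com", "org", "net"].contains cur) then tokens ++ [cur] else tokens)
          from by simp [pvScan, h]]
      rw [ih]
      rw [List.splitOnP_cons]
      simp only [show pvAll c = true from h, if_true, List.modifyHead_cons, List.filter_cons,
        String.toList_empty, List.nil_append, List.append_nil]
      have hg : pvGoodL cur.toList = ((!(cur == "")) && !(["com", "org", "net"].contains cur)) := by
        simp [pvGoodL, String.ofList_toList]
      rw [hg]
      by_cases hc : ((!(cur == "")) && !(["com", "org", "net"].contains cur)) = true
      · rw [if_pos hc, if_pos hc]
        simp [String.ofList_toList]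
        cases (List.splitOnP pvAll t) <;> simp
      · rw [if_neg hc, if_neg hc]
        simp
        cases (List.splitOnP pvAll t) <;> simp
    · rw [show pvScan (c :: t) cur tokens = pvScan t (cur.push c) tokens
          from by simp [pvScan, h]]
      rw [ih]
      rw [List.splitOnP_cons, if_neg (by simpa [pvAll] using h), List.modifyHead_modifyHead]
      have hcomp : ((fun x => cur.toList ++ x) ∘ List.cons c) = (fun x => (cur.push c).toList ++ x) := by
        funext x; simp [String.toList_push]
      rw [hcomp]

theorem pvAll_false (c : Char) (h : pvAll c = false) :
    (c == '/') = false ∧ (c == '.') = false ∧ (c == '-') = false := by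
  simp [pvAll] at h
  obtain ⟨⟨h1, h2⟩, h3⟩ := h
  simp [h1, h2, h3]

theorem pv_modifyHead_nil {α : Type} (X : List (List α)) :
    X.modifyHead (fun x => ([] : List α) ++ x) = X := by
  cases X <;> simp

theorem pv_map_free (pre : List Char) (h : ∀ c ∈ pre, pvAll c = false) :
    pre.map pvF = pre := by
  rw [List.map_congr_left (g := fun c => c)
    (fun c hc => by simp [pvF, (pvAll_false c (h c hc)).2.1])]
  simp

theorem pv_gA_free (pre : List Char) (h : ∀ c ∈ pre, pvAll c = false) :
    pvGA pre = List.filter pvGoodL [pre] := by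
  unfold pvGA
  rw [pv_map_free pre h]
  rw [show pre = pre ++ [] from (List.append_nil pre).symm,
    pv_splitOnP_append _ pre [] (fun c hc => (pvAll_false c (h c hc)).2.2)]
  simp [List.splitOnP_nil]

theorem pv_main (l : List Char) :
    ∀ (pre : List Char), (∀ c ∈ pre, pvAll c = false) →
      ((List.splitOnP (· == '/') l).modifyHead (pre ++ ·)).flatMap pvGA
        = ((List.splitOnP pvAll l).modifyHead (pre ++ ·)).filter pvGoodL := by
  induction l with
  | nil =>
    intro pre h
    simp [List.splitOnP_nil, pv_gA_free pre h]
  | cons c t ih =>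
    intro pre h
    by_cases hall : pvAll c = true
    · have hsA : List.splitOnP pvAll (c :: t) = [] :: List.splitOnP pvAll t := by
        rw [List.splitOnP_cons, if_pos hall]
      have hnext := ih [] (by simp)
      rw [pv_modifyHead_nil, pv_modifyHead_nil] at hnext
      by_cases hsl : (c == '/') = true
      · -- slash: both splits cut here
        rw [List.splitOnP_cons, if_pos hsl, hsA]
        simp only [List.modifyHead_cons, List.append_nil, List.flatMap_cons, List.filter_cons]
        rw [pv_gA_free pre h, hnext]
        by_cases hgp : pvGoodL pre = true
        · rw [if_pos hgp]; simp [List.filter_nil, hgp]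
        · rw [if_neg hgp]; simp [List.filter_nil, hgp]
      · -- '.' or '-': only the outer split keeps going
        rw [List.splitOnP_cons, if_neg (by simpa using hsl), hsA]
        obtain ⟨h0, rest, hrw⟩ := List.exists_cons_of_ne_nil (List.splitOnP_ne_nil (· == '/') t)
        rw [hrw]
        simp only [List.modifyHead_cons, List.flatMap_cons, List.append_nil, List.filter_cons]
        have hfc : pvF c = '-' := by
          simp [pvAll] at hall
          rcases hall with (h1 | h1) | h1
          · exact absurd h1 (by simpa using hsl)
          · simp [pvF, h1]
          · simp [pvF, h1]
        have hga : pvGA (pre ++ c :: h0) = List.filter pvGoodL [pre] ++ pvGA h0 := by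
          unfold pvGA
          rw [List.map_append, pv_map_free pre h]
          simp only [List.map_cons, hfc]
          rw [pv_splitOnP_append _ pre _ (fun x hx => (pvAll_false x (h x hx)).2.2)]
          rw [List.splitOnP_cons, if_pos (by simp)]
          simp only [List.modifyHead_cons, List.append_nil, List.filter_cons]
          by_cases hgp : pvGoodL pre = true
          · rw [if_pos hgp]; simp [List.filter_nil, hgp]
          · rw [if_neg hgp]; simp [List.filter_nil, hgp]
        rw [hga]
        rw [hrw] at hnext
        simp only [List.flatMap_cons] at hnext
        rw [List.append_assoc, hnext]
        by_cases hgp : pvGoodL pre = true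
        · rw [if_pos hgp]; simp [List.filter_nil, hgp]
        · rw [if_neg hgp]; simp [List.filter_nil, hgp]
    · -- ordinary character
      have h' : ∀ x ∈ pre ++ [c], pvAll x = false := by
        intro x hx
        rcases List.mem_append.1 hx with hx | hx
        · exact h x hx
        · simp at hx; subst hx; simpa using hall
      have hsl : (c == '/') = false := by
        exact (pvAll_false c (by simpa using hall)).1
      rw [List.splitOnP_cons, if_neg (by simp [hsl]), List.splitOnP_cons,
        if_neg (by simpa using hall)]
      rw [List.modifyHead_modifyHead, List.modifyHead_modifyHead]
      have hcomp : ((fun x => pre ++ x) ∘ List.cons c) = (fun x => (pre ++ [c]) ++ x) := by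
        funext x; simp
      rw [hcomp]
      exact ih (pre ++ [c]) h'

theorem pv_core (u : String) :
    ((PySem.Str.split? u "/").getD []).foldl (fun tokens part =>
      tokens ++ ((PySem.Str.split? (PySem.Str.replace part "." "-") "-").getD []).filter
        (fun token => (!(token == "")) && !(["com", "org", "net"].contains token))) []
    = pvScan u.toList "" [] := by
  rw [pv_scan_eq, String.toList_empty, pv_modifyHead_nil]
  have h1 : (PySem.Str.split? u "/").getD []
      = (List.splitOnP (· == '/') u.toList).map String.ofList := by
    simp [PySem.Str.split?, PySem.Chars.split?, show "/".toList = ['/'] from rfl,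
      pv_splitOn_singleton]
  rw [h1, PySem.List.foldl_append_eq_flatMap, List.flatMap_map, List.nil_append, List.nil_append]
  have h2 : ∀ pl : List Char,
      ((PySem.Str.split? (PySem.Str.replace (String.ofList pl) "." "-") "-").getD []).filter
        (fun token => (!(token == "")) && !(["com", "org", "net"].contains token))
      = (pvGA pl).map String.ofList := by
    intro pl
    have hr : PySem.Str.replace (String.ofList pl) "." "-"
        = String.ofList (pl.map pvF) := by
      show String.ofList (PySem.Chars.replace (String.ofList pl).toList (".").toList ("-").toList) = _
      rw [String.toList_ofList]
      rw [show ".".toList = ['.'] from rfl, show "-".toList = ['-'] from rfl,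
        pv_replace_singleton]
      rfl
    rw [hr]
    simp only [PySem.Str.split?, PySem.Chars.split?, String.toList_ofList,
      show "-".toList = ['-'] from rfl]
    rw [if_neg (by simp), pv_splitOn_singleton]
    simp only [Option.map_some, Option.getD_some]
    rw [List.filter_map]
    rfl
  calc List.flatMap (fun pl =>
        ((PySem.Str.split? (PySem.Str.replace (String.ofList pl) "." "-") "-").getD []).filter
          (fun token => (!(token == "")) && !(["com", "org", "net"].contains token)))
        (List.splitOnP (· == '/') u.toList)
      = List.flatMap (fun pl => (pvGA pl).map String.ofList)
          (List.splitOnP (· == '/') u.toList) := by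
        exact List.flatMap_congr (fun pl _ => h2 pl)
    _ = ((List.splitOnP (· == '/') u.toList).flatMap pvGA).map String.ofList := by
        rw [List.map_flatMap]
    _ = _ := by
        have := pv_main u.toList [] (by simp)
        rw [pv_modifyHead_nil, pv_modifyHead_nil] at this
        rw [this]

-- ===== VERDICT (by name: the statement is the Claim_ definition above) =====
set_option maxHeartbeats 1000000 in
theorem improved_sanitization_spec : Claim_equal_improved_sanitization := by
  intro url _
  unfold Spec_improved_sanitization
  simp only [improved_sanitization, improved_sanitization_alt]
  exact pv_core _
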